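-- pv_equiv track=rewrite | github.com/B-Angyal-G/generalis-admin | graph_solver/generalis-admin-bak.py | graph_merge
-- ===== SOURCE A (Python) =====
-- def graph_merge(graph_day, graph_night, day_shifts, night_shifts, admins, DAYS):
--     ### VEGSO TABLAZAT, ELSO OSZLOPA AZ ADMINOK NEVEI
--     final_table = [[admin] for admin in admins]
--     for i in range(len(final_table)):
--         final_table[i] += (list('' for j in range(DAYS)))
--
--     ### NAPPALOS MUSZAKOK EGYBE IRASA
--     for row in range(len(graph_day)):
--         for col in range(len(graph_day[row])):
--             if graph_day[row][col][1] in {1, 4}: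
--                 final_table[whois(row, day_shifts)][col + 1] = 'N'
--
--     ### EJSZAKAS MUSZAKOK EGYBE IRASA
--     for row in range(len(graph_night)):
--         for col in range(len(graph_night[row])):
--             if graph_night[row][col][1] in {1, 4}:
--                 final_table[whois(row, night_shifts)][col + 1] = 'E'
--
--     return final_table
--
-- def whois(row, shifts):
--     s = 0
--     for i in range(len(shifts)):
--         s += shifts[i]
--         if s > row:
--             return i
-- ===== SOURCE B (Python) =====
-- def graph_merge(graph_day, graph_night, day_shifts, night_shifts, admins, DAYS):
--     table = [[admin] + [''] * DAYS for admin in admins]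
--     for graph, shifts, mark in ((graph_day, day_shifts, 'N'), (graph_night, night_shifts, 'E')):
--         # two-pointer sweep: owner[r] = admin index of row r, computed once
--         # (amortized O(rows + len(shifts)) instead of a whois scan per marked cell)
--         owner = []
--         i = 0
--         acc = 0
--         for r in range(len(graph)):
--             while i < len(shifts) and acc + shifts[i] <= r:
--                 acc += shifts[i]
--                 i += 1
--             owner.append(i)
--         for r in range(len(graph)):
--             for c in range(len(graph[r])):
--                 if graph[r][c][1] in (1, 4):
--                     table[owner[r]][c + 1] = mark
--     return table
-- ===== Notes on version B (the rewrite author's own statement) =====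
-- stated objective: faster
-- what changed: B precomputes once per graph, with a two-pointer sweep over (rows, shifts), the owner array mapping each row to its admin index, replacing A's per-marked-cell whois prefix-sum scan by an O(1) lookup, and runs the day/night passes through one parameterized loop.
import Mathlib
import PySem

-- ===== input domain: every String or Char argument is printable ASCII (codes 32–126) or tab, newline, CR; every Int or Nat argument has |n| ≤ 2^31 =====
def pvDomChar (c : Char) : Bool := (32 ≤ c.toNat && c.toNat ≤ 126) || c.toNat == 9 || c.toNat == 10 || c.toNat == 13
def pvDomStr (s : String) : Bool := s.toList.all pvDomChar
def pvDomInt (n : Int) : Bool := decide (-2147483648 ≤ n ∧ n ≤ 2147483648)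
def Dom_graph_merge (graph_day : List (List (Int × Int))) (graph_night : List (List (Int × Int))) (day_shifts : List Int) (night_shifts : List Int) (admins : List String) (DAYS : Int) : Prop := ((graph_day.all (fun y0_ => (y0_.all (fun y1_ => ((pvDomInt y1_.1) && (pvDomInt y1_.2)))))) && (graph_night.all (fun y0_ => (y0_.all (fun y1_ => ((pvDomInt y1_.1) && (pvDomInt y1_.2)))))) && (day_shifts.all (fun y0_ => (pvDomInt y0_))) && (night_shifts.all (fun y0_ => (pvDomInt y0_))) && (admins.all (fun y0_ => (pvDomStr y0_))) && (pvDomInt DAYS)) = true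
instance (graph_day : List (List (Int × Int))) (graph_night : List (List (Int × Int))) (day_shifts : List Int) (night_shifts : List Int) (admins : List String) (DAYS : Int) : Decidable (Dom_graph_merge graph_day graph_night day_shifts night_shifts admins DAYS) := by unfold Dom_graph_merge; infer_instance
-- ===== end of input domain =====

-- B replaces A's per-marked-cell whois prefix-sum scan by a two-pointer sweep that computes the
-- row → admin-index owner array once per graph, and runs the day/night passes through one
-- parameterized loop. Return-value equivalence on Pre_ (exactly where A returns normally).

-- ===== PORT A =====
-- table[i][j] = v  (both Pythons mutate a cell; in range on Pre_ inputs)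
def setCell (t : List (List String)) (i j : Nat) (v : String) : List (List String) :=
  t.set i ((t.getD i []).set j v)

-- A's whois: running sum with early return; none = Python's implicit None (A then raises)
def whoisGo (row : Int) (shifts : List Int) (i : Nat) (s : Int) : Option Nat :=
  match shifts with
  | [] => none
  | x :: rest => if s + x > row then some i else whoisGo row rest (i + 1) (s + x)

def whois (row : Int) (shifts : List Int) : Option Nat := whoisGo row shifts 0 0

def graph_merge (graph_day : List (List (Int × Int))) (graph_night : List (List (Int × Int))) (day_shifts : List Int) (night_shifts : List Int) (admins : List String) (DAYS : Int) : List (List String) :=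
  let ft := admins.map (fun a => [a]);
  let ft := (List.range ft.length).foldl
      (fun t i => t.set i ((t.getD i []) ++ List.replicate DAYS.toNat "")) ft;
  let ft := (List.range graph_day.length).foldl (fun t row =>
      (List.range (graph_day.getD row []).length).foldl (fun t col =>
        if ((graph_day.getD row []).getD col (0, 0)).2 = 1 ∨ ((graph_day.getD row []).getD col (0, 0)).2 = 4 then
          match whois (row : Int) day_shifts with
          | some i => setCell t i (col + 1) "N"
          | none => t
        else t) t) ft;
  let ft := (List.range graph_night.length).foldl (fun t row =>
      (List.range (graph_night.getD row []).length).foldl (fun t col =>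
        if ((graph_night.getD row []).getD col (0, 0)).2 = 1 ∨ ((graph_night.getD row []).getD col (0, 0)).2 = 4 then
          match whois (row : Int) night_shifts with
          | some i => setCell t i (col + 1) "E"
          | none => t
        else t) t) ft;
  ft

-- ===== PORT B =====
-- Source B's inner while: advance the shift pointer while the next block still ends at or before row r
-- (the pointer i / running sum acc / the not-yet-consumed suffix of shifts)
def advance (r : Int) : Nat → Int → List Int → Nat × Int × List Int
  | i, acc, [] => (i, acc, [])
  | i, acc, x :: rest => if acc + x ≤ r then advance r (i + 1) (acc + x) rest else (i, acc, x :: rest)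

-- one iteration of Source B's 'for r in range(len(graph))' owner-building loop
def sweepStep (s : Nat × Int × List Int × List Nat) (r : Nat) : Nat × Int × List Int × List Nat :=
  let a := advance (r : Int) s.1 s.2.1 s.2.2.1
  (a.1, a.2.1, a.2.2, s.2.2.2 ++ [a.1])

def buildOwner (n : Nat) (shifts : List Int) : List Nat :=
  ((List.range n).foldl sweepStep (0, 0, shifts, [])).2.2.2

-- one pass of Source B's outer (graph, shifts, mark) loop
def markPass (t : List (List String)) (graph : List (List (Int × Int))) (shifts : List Int) (mark : String) : List (List String) :=
  let owner := buildOwner graph.length shifts;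
  (List.range graph.length).foldl (fun t row =>
    (List.range (graph.getD row []).length).foldl (fun t col =>
      if ((graph.getD row []).getD col (0, 0)).2 = 1 ∨ ((graph.getD row []).getD col (0, 0)).2 = 4 then
        setCell t (owner.getD row 0) (col + 1) mark
      else t) t) t

def graph_merge_alt (graph_day : List (List (Int × Int))) (graph_night : List (List (Int × Int))) (day_shifts : List Int) (night_shifts : List Int) (admins : List String) (DAYS : Int) : List (List String) :=
  let t := admins.map (fun a => [a] ++ List.replicate DAYS.toNat "");
  [(graph_day, day_shifts, "N"), (graph_night, night_shifts, "E")].foldl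
    (fun t spec => markPass t spec.1 spec.2.1 spec.2.2) t

-- ===== PRECONDITION & SPEC =====
-- Exactly the inputs on which Python A returns normally: every marked cell (flag 1 or 4) at
-- (row, col) has its column inside DAYS (else IndexError) and some admin index i whose shift
-- prefix covers the row (else whois yields None / an out-of-range admin index and A raises).
def prefOk (graph : List (List (Int × Int))) (shifts : List Int) (admins : List String) (DAYS : Int) : Prop :=
  ∀ row ∈ List.range graph.length, ∀ col ∈ List.range (graph.getD row []).length,
    (((graph.getD row []).getD col (0, 0)).2 = 1 ∨ ((graph.getD row []).getD col (0, 0)).2 = 4) →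
      ((col : Int) + 1 ≤ DAYS ∧
        ∃ i ∈ List.range admins.length, (row : Int) < (shifts.take (i + 1)).sum)

def Pre_graph_merge (graph_day : List (List (Int × Int))) (graph_night : List (List (Int × Int))) (day_shifts : List Int) (night_shifts : List Int) (admins : List String) (DAYS : Int) : Prop :=
  prefOk graph_day day_shifts admins DAYS ∧ prefOk graph_night night_shifts admins DAYS

instance (graph_day : List (List (Int × Int))) (graph_night : List (List (Int × Int))) (day_shifts : List Int) (night_shifts : List Int) (admins : List String) (DAYS : Int) : Decidable (Pre_graph_merge graph_day graph_night day_shifts night_shifts admins DAYS) := by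
  unfold Pre_graph_merge prefOk; infer_instance

def pvWitness_graph_merge : (List (List (Int × Int))) × (List (List (Int × Int))) × List Int × List Int × List String × Int :=
  ([[(0, 1)]], [], [1], [], ["a"], 1)

def Spec_graph_merge (graph_day : List (List (Int × Int))) (graph_night : List (List (Int × Int))) (day_shifts : List Int) (night_shifts : List Int) (admins : List String) (DAYS : Int) (out : List (List String)) : Prop := out = graph_merge_alt graph_day graph_night day_shifts night_shifts admins DAYS
instance (graph_day : List (List (Int × Int))) (graph_night : List (List (Int × Int))) (day_shifts : List Int) (night_shifts : List Int) (admins : List String) (DAYS : Int) (out : List (List String)) : Decidable (Spec_graph_merge graph_day graph_night day_shifts night_shifts admins DAYS out) := by unfold Spec_graph_merge; infer_instance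

-- ===== CLAIM (what is proved, stated in full; the proofs are below) =====
def Claim_equal_graph_merge : Prop := ∀ (graph_day : List (List (Int × Int))) (graph_night : List (List (Int × Int))) (day_shifts : List Int) (night_shifts : List Int) (admins : List String) (DAYS : Int), Dom_graph_merge graph_day graph_night day_shifts night_shifts admins DAYS → Pre_graph_merge graph_day graph_night day_shifts night_shifts admins DAYS → Spec_graph_merge graph_day graph_night day_shifts night_shifts admins DAYS (graph_merge graph_day graph_night day_shifts night_shifts admins DAYS)

-- ===== LEMMAS AND PROOFS =====

-- reading a whois answer off a stopped sweep state: none iff the shifts ran out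
def ofSt (a : Nat × Int × List Int) : Option Nat :=
  match a.2.2 with
  | [] => none
  | _ :: _ => some a.1

-- A's whois is B's advance with the early return replaced by the stop state
lemma whois_advance : ∀ (l : List Int) (r : Int) (i : Nat) (acc : Int),
    whoisGo r l i acc = ofSt (advance r i acc l) := by
  intro l
  induction l with
  | nil => intro r i acc; rfl
  | cons x rest ih =>
    intro r i acc
    simp only [whoisGo, advance]
    by_cases h : acc + x > r
    · rw [if_pos h, if_neg (by omega)]; rfl
    · rw [if_neg h, if_pos (by omega), ih]

-- advancing to bound r' and then to a larger bound r is advancing to r directly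
lemma advance_comp (l : List Int) : ∀ (r' r : Int) (i : Nat) (acc : Int), r' ≤ r →
    advance r (advance r' i acc l).1 (advance r' i acc l).2.1 (advance r' i acc l).2.2 =
      advance r i acc l := by
  induction l with
  | nil => intro r' r i acc _; rfl
  | cons x rest ih =>
    intro r' r i acc h
    simp only [advance]
    by_cases hx : acc + x ≤ r'
    · rw [if_pos hx, if_pos (by omega)]
      exact ih r' r (i + 1) (acc + x) h
    · rw [if_neg hx]
      rfl

-- the sweep's fold invariant: the carried state is interchangeable with a fresh advance,
-- and the owner list holds each processed row's admin index
lemma sweep_inv (shifts : List Int) : ∀ (n : Nat),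
    (∀ r : Int, (n : Int) ≤ r →
        advance r ((List.range n).foldl sweepStep (0, 0, shifts, [])).1
          ((List.range n).foldl sweepStep (0, 0, shifts, [])).2.1
          ((List.range n).foldl sweepStep (0, 0, shifts, [])).2.2.1 = advance r 0 0 shifts) ∧
      ((List.range n).foldl sweepStep (0, 0, shifts, [])).2.2.2 =
        (List.range n).map (fun (k : Nat) => (advance (Int.ofNat k) 0 0 shifts).1) := by
  intro n
  induction n with
  | zero => exact ⟨fun r _ => rfl, rfl⟩
  | succ n ih =>
    obtain ⟨h1, h2⟩ := ih
    rw [List.range_succ, List.foldl_append, List.foldl_cons, List.foldl_nil]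
    simp only [sweepStep]
    rw [h1 (n : Int) (le_refl _)]
    constructor
    · intro r hr
      have hnr : (n : Int) ≤ r := by push_cast at hr; omega
      exact advance_comp shifts (n : Int) r 0 0 hnr
    · simp [h2, List.range_succ]

lemma buildOwner_getD (shifts : List Int) (n r : Nat) (h : r < n) :
    (buildOwner n shifts).getD r 0 = (advance (r : Int) 0 0 shifts).1 := by
  unfold buildOwner
  rw [(sweep_inv shifts n).2, List.getD_eq_getElem?_getD, List.getElem?_map,
      List.getElem?_range h]
  rfl

-- if whois falls off the end, every prefix of shifts failed to exceed the row
lemma whoisGo_none : ∀ (l : List Int) (r s : Int) (i : Nat),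
    whoisGo r l i s = none → ∀ m, m < l.length → s + (l.take (m + 1)).sum ≤ r := by
  intro l
  induction l with
  | nil => intro r s i _ m hm; simp at hm
  | cons x rest ih =>
    intro r s i hnone m hm
    simp only [whoisGo] at hnone
    by_cases h : s + x > r
    · rw [if_pos h] at hnone; exact absurd hnone (by simp)
    · rw [if_neg h] at hnone
      cases m with
      | zero => simpa using h
      | succ m =>
        have hrec := ih r (s + x) (i + 1) hnone m (by simpa using hm)
        rw [List.take_succ_cons, List.sum_cons]
        omega

-- one of A's inline passes equals B's markPass, given the pass's precondition
lemma pass_eq (graph : List (List (Int × Int))) (shifts : List Int) (admins : List String)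
    (DAYS : Int) (mark : String) (hpre : prefOk graph shifts admins DAYS) (t : List (List String)) :
    (List.range graph.length).foldl (fun t row =>
      (List.range (graph.getD row []).length).foldl (fun t col =>
        if ((graph.getD row []).getD col (0, 0)).2 = 1 ∨ ((graph.getD row []).getD col (0, 0)).2 = 4 then
          match whois (row : Int) shifts with
          | some i => setCell t i (col + 1) mark
          | none => t
        else t) t) t = markPass t graph shifts mark := by
  simp only [markPass]
  refine PySem.List.foldl_congr_mem _ _ _ _ ?_
  intro acc row hrow
  refine PySem.List.foldl_congr_mem _ _ _ _ ?_
  intro acc2 col hcol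
  by_cases hm : ((graph.getD row []).getD col (0, 0)).2 = 1 ∨ ((graph.getD row []).getD col (0, 0)).2 = 4
  · obtain ⟨-, i, hi, hsum⟩ := hpre row hrow col hcol hm
    have hrowlt : row < graph.length := List.mem_range.mp hrow
    have hne : whoisGo (row : Int) shifts 0 0 ≠ none := by
      intro hnone
      have hall := whoisGo_none shifts (row : Int) 0 0 hnone
      by_cases hil : i < shifts.length
      · have := hall i hil
        omega
      · have hts : shifts.take (i + 1) = shifts := List.take_of_length_le (by omega)
        rw [hts] at hsum
        have hnil : shifts ≠ [] := by
          intro h0; rw [h0] at hsum; simp at hsum; omega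
        have hl1 : shifts.length - 1 < shifts.length :=
          Nat.sub_lt (List.length_pos_iff.mpr hnil) one_pos
        have hlast := hall (shifts.length - 1) hl1
        rw [show shifts.length - 1 + 1 = shifts.length from by
              have := List.length_pos_iff.mpr hnil; omega,
            List.take_length] at hlast
        omega
    have hsome : whois (row : Int) shifts = some ((advance (row : Int) 0 0 shifts).1) := by
      unfold whois
      rw [whois_advance] at hne ⊢
      unfold ofSt at hne ⊢
      cases hrest : (advance (row : Int) 0 0 shifts).2.2 with
      | nil => rw [hrest] at hne; exact absurd rfl hne
      | cons a l => rfl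
    rw [if_pos hm, if_pos hm, hsome, buildOwner_getD shifts graph.length row hrowlt]
  · rw [if_neg hm, if_neg hm]

-- A's initialization fold appends ext to every row
lemma fold_set_range (ext : List String) : ∀ (n : Nat) (t : List (List String)), n ≤ t.length →
    (List.range n).foldl (fun u i => u.set i ((u.getD i []) ++ ext)) t =
      (t.take n).map (· ++ ext) ++ t.drop n := by
  intro n
  induction n with
  | zero => intro t _; simp
  | succ n ih =>
    intro t hn
    have hlt : n < t.length := by omega
    have hlen : ((t.take n).map (· ++ ext)).length = n := by
      simp [Nat.min_eq_left (le_of_lt hlt)]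
    have hdrop : t.drop n = t[n] :: t.drop (n + 1) := List.drop_eq_getElem_cons hlt
    rw [List.range_succ, List.foldl_append, ih t (by omega), List.foldl_cons, List.foldl_nil]
    have hget : (((t.take n).map (· ++ ext)) ++ t.drop n).getD n [] = t[n] := by
      rw [List.getD_eq_getElem?_getD, List.getElem?_append_right (by rw [hlen]), hlen,
          Nat.sub_self, hdrop]
      rfl
    rw [hget, List.set_append, hlen, if_neg (by omega), Nat.sub_self, hdrop,
        List.set_cons_zero]
    have h2 : t.take (n + 1) = t.take n ++ [t[n]] := by
      rw [List.take_succ, List.getElem?_eq_getElem hlt]; rfl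
    rw [h2, List.map_append]
    simp

lemma init_eq (admins : List String) (ext : List String) :
    (List.range (admins.map (fun a => [a])).length).foldl
      (fun u i => u.set i ((u.getD i []) ++ ext)) (admins.map (fun a => [a])) =
    admins.map (fun a => [a] ++ ext) := by
  rw [List.length_map, fold_set_range ext admins.length _ (by simp)]
  rw [List.take_of_length_le (by simp), List.drop_of_length_le (by simp)]
  simp [List.map_map, Function.comp_def]

-- ===== VERDICT (by name: the statement is the Claim_ definition above) =====
theorem graph_merge_spec : Claim_equal_graph_merge := by
  intro gd gn ds ns admins DAYS _ hpre
  obtain ⟨hd, hn⟩ := hpre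
  unfold Spec_graph_merge graph_merge graph_merge_alt
  simp only [List.foldl_cons, List.foldl_nil]
  rw [init_eq, pass_eq gd ds admins DAYS "N" hd, pass_eq gn ns admins DAYS "E" hn]
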